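-- pv_equiv track=rewrite | github.com/chiragbheemaiah/audio-fingerprinting | app/fingerprint.py | compute_constellations
-- ===== SOURCE A (Python) =====
-- def compute_constellations(spectrogram, WINDOW_SIZE):
--     '''
--     Calculate in a window of size WINDOW_SIZE, the max element and its position.
--     '''
--     max_points = []
--     r, c = len(spectrogram), len(spectrogram[0])
--     for i in range(0, r, WINDOW_SIZE):
--         for j in range(0, c, WINDOW_SIZE):
--             max_ele = -1
--             max_k= -1
--             max_l = -1
--             for k in range(i, i + WINDOW_SIZE):
--                 for l in range(j, j + WINDOW_SIZE):
--                     if k >= r or l >= c: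
--                         continue
--                     if spectrogram[k][l] > max_ele:
--                         max_ele = spectrogram[k][l]
--                         max_k = k
--                         max_l = l
--             max_points.append([max_k, max_l, spectrogram[max_k][max_l]])
--     return max_points
-- ===== SOURCE B (Python) =====
-- def compute_constellations(spectrogram, WINDOW_SIZE):
--     '''
--     Calculate in a window of size WINDOW_SIZE, the max element and its position.
--     One row-major pass bucketing each cell by its window key, then one readback loop.
--     '''
--     r, c = len(spectrogram), len(spectrogram[0])
--     best = {}
--     for k, row in enumerate(spectrogram):
--         for l, v in enumerate(row[:c]):
--             key = (k // WINDOW_SIZE, l // WINDOW_SIZE)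
--             cur = best.get(key, (-1, -1, -1))
--             if v > cur[0]:
--                 best[key] = (v, k, l)
--     max_points = []
--     for i in range(0, r, WINDOW_SIZE):
--         for j in range(0, c, WINDOW_SIZE):
--             _, bk, bl = best.get((i // WINDOW_SIZE, j // WINDOW_SIZE), (-1, -1, -1))
--             max_points.append([bk, bl, spectrogram[bk][bl]])
--     return max_points
-- ===== Notes on version B (the rewrite author's own statement) =====
-- stated objective: faster
-- what changed: A rescans a WINDOW_SIZE x WINDOW_SIZE index block per window (including out-of-grid guard iterations), with four nested loops; B makes one row-major pass over the actual cells, bucketing each cell's running maximum into a dict keyed by (k//WINDOW_SIZE, l//WINDOW_SIZE), then a separate loop over window origins reads the buckets back.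
import Mathlib
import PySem

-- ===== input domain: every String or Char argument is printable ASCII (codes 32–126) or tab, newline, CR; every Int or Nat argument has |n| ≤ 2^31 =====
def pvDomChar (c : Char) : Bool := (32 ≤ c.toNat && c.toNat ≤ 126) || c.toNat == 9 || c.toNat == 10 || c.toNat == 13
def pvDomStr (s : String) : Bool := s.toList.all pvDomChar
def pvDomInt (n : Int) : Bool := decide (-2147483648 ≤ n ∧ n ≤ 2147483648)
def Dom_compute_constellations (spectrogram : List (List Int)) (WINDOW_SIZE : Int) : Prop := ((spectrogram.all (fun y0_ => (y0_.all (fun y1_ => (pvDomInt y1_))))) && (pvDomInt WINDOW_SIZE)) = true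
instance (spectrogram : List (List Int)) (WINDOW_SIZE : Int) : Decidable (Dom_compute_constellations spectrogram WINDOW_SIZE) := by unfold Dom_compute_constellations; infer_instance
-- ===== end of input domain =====

set_option maxHeartbeats 1000000

-- B replaces A's per-window rescans by one single row-major pass that buckets every cell into a
-- dict keyed by its window, then reads the buckets back (objective: alternative; return value only).

-- ===== PORT A =====
def pvAtA (spectrogram : List (List Int)) (k l : Int) : Int :=
  (PySem.List.pyGet? ((PySem.List.pyGet? spectrogram k).getD []) l).getD 0

def compute_constellations (spectrogram : List (List Int)) (WINDOW_SIZE : Int) : List (List Int) :=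
  let r : Int := spectrogram.length
  let c : Int := ((PySem.List.pyGet? spectrogram 0).getD []).length
  (PySem.List.pyRange 0 r WINDOW_SIZE).foldl (fun max_points i =>
    (PySem.List.pyRange 0 c WINDOW_SIZE).foldl (fun max_points j =>
      let st :=
        (PySem.List.pyRange i (i + WINDOW_SIZE) 1).foldl (fun st k =>
          (PySem.List.pyRange j (j + WINDOW_SIZE) 1).foldl (fun (st : Int × Int × Int) l =>
            if k ≥ r ∨ l ≥ c then st
            else if pvAtA spectrogram k l > st.1 then (pvAtA spectrogram k l, k, l) else st) st)
          ((-1 : Int), (-1 : Int), (-1 : Int))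
      max_points ++ [[st.2.1, st.2.2, pvAtA spectrogram st.2.1 st.2.2]]) max_points) []

-- ===== PORT B =====
def pvRowB (spectrogram : List (List Int)) (k : Int) : List Int :=
  (PySem.List.pyGet? spectrogram k).getD []

def compute_constellations_alt (spectrogram : List (List Int)) (WINDOW_SIZE : Int) : List (List Int) :=
  let r : Int := spectrogram.length
  let c : Int := ((PySem.List.pyGet? spectrogram 0).getD []).length
  let best : PySem.Dict (Int × Int) (Int × Int × Int) :=
    (PySem.List.enumerate spectrogram).foldl (fun best kr =>
      (PySem.List.enumerate (PySem.List.slice kr.2 none (some c))).foldl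
        (fun (best : PySem.Dict (Int × Int) (Int × Int × Int)) lv =>
          let key := (PySem.Int.floordiv kr.1 WINDOW_SIZE, PySem.Int.floordiv lv.1 WINDOW_SIZE)
          let cur := best.getD key ((-1 : Int), (-1 : Int), (-1 : Int))
          if lv.2 > cur.1 then best.insert key (lv.2, kr.1, lv.1) else best) best) PySem.Dict.empty
  (PySem.List.pyRange 0 r WINDOW_SIZE).foldl (fun max_points i =>
    (PySem.List.pyRange 0 c WINDOW_SIZE).foldl (fun max_points j =>
      let b := best.getD (PySem.Int.floordiv i WINDOW_SIZE, PySem.Int.floordiv j WINDOW_SIZE)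
                 ((-1 : Int), (-1 : Int), (-1 : Int))
      max_points ++ [[b.2.1, b.2.2, (PySem.List.pyGet? (pvRowB spectrogram b.2.1) b.2.2).getD 0]]) max_points) []

-- ===== PRECONDITION & SPEC =====
-- Pre_ excludes exactly the inputs on which the Python A raises: an empty spectrogram (IndexError
-- on spectrogram[0]), WINDOW_SIZE = 0 (ValueError from range), and, for positive WINDOW_SIZE, a
-- ragged spectrogram with a row shorter than row 0 (IndexError); A returns on every admitted input.
def Pre_compute_constellations (spectrogram : List (List Int)) (WINDOW_SIZE : Int) : Prop :=
  spectrogram ≠ [] ∧ WINDOW_SIZE ≠ 0 ∧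
    (0 < WINDOW_SIZE → ∀ row ∈ spectrogram, (spectrogram.headD []).length ≤ row.length)
instance (spectrogram : List (List Int)) (WINDOW_SIZE : Int) : Decidable (Pre_compute_constellations spectrogram WINDOW_SIZE) := by unfold Pre_compute_constellations; infer_instance

def pvWitness_compute_constellations : List (List Int) × Int := ([[1, 5], [3, 4]], 2)

def Spec_compute_constellations (spectrogram : List (List Int)) (WINDOW_SIZE : Int) (out : List (List Int)) : Prop := out = compute_constellations_alt spectrogram WINDOW_SIZE
instance (spectrogram : List (List Int)) (WINDOW_SIZE : Int) (out : List (List Int)) : Decidable (Spec_compute_constellations spectrogram WINDOW_SIZE out) := by unfold Spec_compute_constellations; infer_instance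

-- ===== CLAIM (what is proved, stated in full; the proofs are below) =====
def Claim_equal_compute_constellations : Prop := ∀ (spectrogram : List (List Int)) (WINDOW_SIZE : Int), Dom_compute_constellations spectrogram WINDOW_SIZE → Pre_compute_constellations spectrogram WINDOW_SIZE → Spec_compute_constellations spectrogram WINDOW_SIZE (compute_constellations spectrogram WINDOW_SIZE)

-- ===== LEMMAS AND PROOFS =====

-- range(0, r, W) is empty for negative W and nonnegative r
theorem pvRange_neg_nil (r W : Int) (h0 : 0 ≤ r) (hW : W < 0) : PySem.List.pyRange 0 r W = [] := by
  unfold PySem.List.pyRange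
  rw [if_neg (by omega : ¬ W = 0)]
  simp only [if_neg (by omega : ¬ 0 < W), if_neg (by omega : ¬ r < 0)]
  simp

-- a nested loop over two index lists is one loop over the list of index pairs
theorem pvFoldFlat {α β γ : Type} (f : γ → α → β → γ) (ks : List α) (ls : List β) (init : γ) :
    ks.foldl (fun acc k => ls.foldl (fun acc l => f acc k l) acc) init
      = (ks.flatMap (fun k => ls.map (fun l => (k, l)))).foldl (fun acc p => f acc p.1 p.2) init := by
  induction ks generalizing init with
  | nil => simp
  | cons k ks ih => simp [List.foldl_append, List.foldl_map, ih]

-- filtering a unit-step range by an interval is a sub-range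
theorem pvFilterInterval (a b lo hi : Int) :
    (PySem.List.pyRange a b 1).filter (fun x => decide (lo ≤ x ∧ x < hi))
      = PySem.List.pyRange (max a lo) (min b hi) 1 := by
  generalize hn : (b - a).toNat = n
  induction n generalizing a with
  | zero =>
    rw [PySem.List.pyRange_one_eq_nil (by omega), PySem.List.pyRange_one_eq_nil (by omega)]
    simp
  | succ n ih =>
    have hab : a < b := by omega
    rw [PySem.List.pyRange_one_cons hab, List.filter_cons]
    have ih' := ih (a + 1) (by omega)
    by_cases hk : lo ≤ a ∧ a < hi
    · rw [if_pos (by simpa using hk), ih']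
      have h1 : max (a + 1) lo = a + 1 := by omega
      have h2 : max a lo = a := by omega
      rw [h1, h2]
      conv_rhs => rw [PySem.List.pyRange_one_cons (show a < min b hi by omega)]
    · rw [if_neg (by simpa using hk), ih']
      rcases (by omega : a < lo ∨ hi ≤ a) with h | h
      · congr 1
        omega
      · rw [PySem.List.pyRange_one_eq_nil (by omega), PySem.List.pyRange_one_eq_nil (by omega)]

theorem pvFilterFlatMap {α β : Type} (l : List α) (f : α → List β) (p : β → Bool) :
    (l.flatMap f).filter p = l.flatMap (fun x => (f x).filter p) := by
  induction l with
  | nil => simp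
  | cons x l ih => simp [List.filter_append, ih]

theorem pvFlatMapIf {α β : Type} (l : List α) (p : α → Prop) [DecidablePred p] (f : α → List β) :
    (l.flatMap (fun x => if p x then f x else [])) = (l.filter (fun x => decide (p x))).flatMap f := by
  induction l with
  | nil => simp
  | cons x l ih =>
    by_cases h : p x <;> simp [h, ih]

-- after the single pass, each bucket of the dict is the fold of the cells of its window, in order
theorem pvDictScan (s : List (List Int)) (W : Int) (xs : List (Int × Int))
    (d : PySem.Dict (Int × Int) (Int × Int × Int)) (q : Int × Int) :
    ((xs.foldl (fun d p =>
        if pvAtA s p.1 p.2 > (d.getD (PySem.Int.floordiv p.1 W, PySem.Int.floordiv p.2 W) (-1, -1, -1)).1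
        then d.insert (PySem.Int.floordiv p.1 W, PySem.Int.floordiv p.2 W) (pvAtA s p.1 p.2, p.1, p.2)
        else d) d).getD q (-1, -1, -1))
      = (xs.filter (fun p => decide ((PySem.Int.floordiv p.1 W, PySem.Int.floordiv p.2 W) = q))).foldl
          (fun st p => if pvAtA s p.1 p.2 > st.1 then (pvAtA s p.1 p.2, p.1, p.2) else st)
          (d.getD q (-1, -1, -1)) := by
  induction xs generalizing d with
  | nil => simp
  | cons p xs ih =>
    rw [List.foldl_cons, List.filter_cons]
    by_cases hk : (PySem.Int.floordiv p.1 W, PySem.Int.floordiv p.2 W) = q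
    · rw [if_pos (show decide ((PySem.Int.floordiv p.1 W, PySem.Int.floordiv p.2 W) = q) = true
          by simpa using hk), List.foldl_cons]
      by_cases hv : pvAtA s p.1 p.2 >
          (d.getD (PySem.Int.floordiv p.1 W, PySem.Int.floordiv p.2 W) (-1, -1, -1)).1
      · rw [if_pos hv, ih]
        congr 1
        rw [PySem.Dict.getD_insert, if_pos hk.symm]
        rw [hk] at hv
        rw [if_pos hv]
      · rw [if_neg hv, ih]
        congr 1
        rw [hk] at hv
        rw [if_neg hv]
    · rw [if_neg (show ¬ decide ((PySem.Int.floordiv p.1 W, PySem.Int.floordiv p.2 W) = q) = true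
          by simpa using hk)]
      by_cases hv : pvAtA s p.1 p.2 >
          (d.getD (PySem.Int.floordiv p.1 W, PySem.Int.floordiv p.2 W) (-1, -1, -1)).1
      · rw [if_pos hv, ih]
        congr 1
        rw [PySem.Dict.getD_insert, if_neg (fun h => hk h.symm)]
      · rw [if_neg hv, ih]

theorem pvFdivMul (x W : Int) (hW : 0 < W) (hd : W ∣ x) : PySem.Int.floordiv x W * W = x := by
  obtain ⟨m, hm⟩ := hd
  obtain ⟨ha, hb⟩ := (PySem.Int.floordiv_eq_iff_of_pos (a := x) hW).mp rfl
  subst hm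
  have ha' : PySem.Int.floordiv (W * m) W * W ≤ m * W := by rw [mul_comm m W]; exact ha
  have hb' : m * W < (PySem.Int.floordiv (W * m) W + 1) * W := by rw [mul_comm m W]; exact hb
  have hle : PySem.Int.floordiv (W * m) W ≤ m := le_of_mul_le_mul_right ha' hW
  have hlt : m < PySem.Int.floordiv (W * m) W + 1 := lt_of_mul_lt_mul_right hb' (le_of_lt hW)
  have hm : PySem.Int.floordiv (W * m) W = m := by omega
  rw [hm]; ring

-- a cell shares its window key with the window origin iff it lies in the window
theorem pvFdivWindow (k i W : Int) (hW : 0 < W) (hd : W ∣ i) :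
    (PySem.Int.floordiv k W = PySem.Int.floordiv i W) ↔ (i ≤ k ∧ k < i + W) := by
  have hqi := pvFdivMul i W hW hd
  rw [PySem.Int.floordiv_eq_iff_of_pos hW, add_mul, one_mul, hqi]

-- the crux: A's scan of the window (i, j) computes exactly B's bucket at that window's key
theorem pvWindow (s : List (List Int)) (W i j r c : Int) (hW : 0 < W)
    (hi : i ∈ PySem.List.pyRange 0 r W) (hj : j ∈ PySem.List.pyRange 0 c W) :
    ((PySem.List.pyRange i (i + W) 1).foldl (fun st k =>
        (PySem.List.pyRange j (j + W) 1).foldl (fun (st : Int × Int × Int) l =>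
          if k ≥ r ∨ l ≥ c then st
          else if pvAtA s k l > st.1 then (pvAtA s k l, k, l) else st) st)
      ((-1 : Int), (-1 : Int), (-1 : Int)))
    = (((PySem.List.pyRange 0 r 1).foldl (fun best k =>
          (PySem.List.pyRange 0 c 1).foldl (fun best l =>
            if pvAtA s k l >
                 ((best : PySem.Dict (Int × Int) (Int × Int × Int)).getD
                   (PySem.Int.floordiv k W, PySem.Int.floordiv l W) (-1, -1, -1)).1
            then best.insert (PySem.Int.floordiv k W, PySem.Int.floordiv l W) (pvAtA s k l, k, l)
            else best) best) PySem.Dict.empty).getD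
        (PySem.Int.floordiv i W, PySem.Int.floordiv j W) (-1, -1, -1)) := by
  obtain ⟨hi0, hir, hidvd⟩ := (PySem.List.mem_pyRange_iff_of_pos hW i).mp hi
  obtain ⟨hj0, hjc, hjdvd⟩ := (PySem.List.mem_pyRange_iff_of_pos hW j).mp hj
  rw [Int.sub_zero] at hidvd hjdvd
  -- cells of the window (i, j), row-major
  have hcells :
      ((PySem.List.pyRange 0 r 1).flatMap (fun k => (PySem.List.pyRange 0 c 1).map (fun l => (k, l)))).filter
          (fun p => decide ((PySem.Int.floordiv p.1 W, PySem.Int.floordiv p.2 W)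
            = (PySem.Int.floordiv i W, PySem.Int.floordiv j W)))
        = (PySem.List.pyRange i (min r (i + W)) 1).flatMap
            (fun k => (PySem.List.pyRange j (min c (j + W)) 1).map (fun l => (k, l))) := by
    simp only [pvFilterFlatMap]
    have hstep : ∀ k : Int,
        ((PySem.List.pyRange 0 c 1).map (fun l => (k, l))).filter
            (fun p => decide ((PySem.Int.floordiv p.1 W, PySem.Int.floordiv p.2 W)
              = (PySem.Int.floordiv i W, PySem.Int.floordiv j W)))
          = if PySem.Int.floordiv k W = PySem.Int.floordiv i W
            then (PySem.List.pyRange j (min c (j + W)) 1).map (fun l => (k, l)) else [] := by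
      intro k
      rw [List.filter_map]
      by_cases hk : PySem.Int.floordiv k W = PySem.Int.floordiv i W
      · rw [if_pos hk]
        congr 1
        have hcg : ∀ l ∈ PySem.List.pyRange 0 c 1,
            ((fun p : Int × Int => decide ((PySem.Int.floordiv p.1 W, PySem.Int.floordiv p.2 W)
              = (PySem.Int.floordiv i W, PySem.Int.floordiv j W))) ∘ (fun l => (k, l))) l
            = decide (j ≤ l ∧ l < j + W) := by
          intro l _
          simp only [Function.comp_apply, decide_eq_decide, Prod.mk.injEq]
          constructor
          · rintro ⟨-, h2⟩; exact (pvFdivWindow l j W hW hjdvd).mp h2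
          · intro h2; exact ⟨hk, (pvFdivWindow l j W hW hjdvd).mpr h2⟩
        rw [List.filter_congr hcg, pvFilterInterval 0 c j (j + W), max_eq_right hj0]
      · rw [if_neg hk]
        have hnil : List.filter ((fun p : Int × Int => decide ((PySem.Int.floordiv p.1 W, PySem.Int.floordiv p.2 W)
              = (PySem.Int.floordiv i W, PySem.Int.floordiv j W))) ∘ (fun l => (k, l)))
            (PySem.List.pyRange 0 c 1) = [] := by
          rw [List.filter_eq_nil_iff]
          intro l _
          simp only [Function.comp_apply, decide_eq_true_eq, Prod.mk.injEq, not_and]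
          intro h
          exact absurd h hk
        rw [hnil, List.map_nil]
    rw [List.flatMap_congr (fun k _ => hstep k), pvFlatMapIf]
    have hks : (PySem.List.pyRange 0 r 1).filter
          (fun k => decide (PySem.Int.floordiv k W = PySem.Int.floordiv i W))
        = PySem.List.pyRange i (min r (i + W)) 1 := by
      rw [List.filter_congr (p := fun k => decide (PySem.Int.floordiv k W = PySem.Int.floordiv i W))
            (q := fun k => decide (i ≤ k ∧ k < i + W))
            (fun k _ => by simp only [decide_eq_decide]; exact pvFdivWindow k i W hW hidvd),
          pvFilterInterval 0 r i (i + W), max_eq_right hi0]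
    rw [hks]
  -- A's window scan, with the out-of-grid guard folded away
  have hA :
      ((PySem.List.pyRange i (i + W) 1).foldl (fun st k =>
          (PySem.List.pyRange j (j + W) 1).foldl (fun (st : Int × Int × Int) l =>
            if k ≥ r ∨ l ≥ c then st
            else if pvAtA s k l > st.1 then (pvAtA s k l, k, l) else st) st)
        ((-1 : Int), (-1 : Int), (-1 : Int)))
      = (PySem.List.pyRange i (min r (i + W)) 1).foldl (fun st k =>
          (PySem.List.pyRange j (min c (j + W)) 1).foldl (fun (st : Int × Int × Int) l =>
            if pvAtA s k l > st.1 then (pvAtA s k l, k, l) else st) st)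
        ((-1 : Int), (-1 : Int), (-1 : Int)) := by
    rw [PySem.List.pyRange_one_append i (min r (i + W)) (i + W) (by omega) (by omega),
        List.foldl_append]
    have htail : ∀ st0 : Int × Int × Int,
        (PySem.List.pyRange (min r (i + W)) (i + W) 1).foldl (fun st k =>
          (PySem.List.pyRange j (j + W) 1).foldl (fun (st : Int × Int × Int) l =>
            if k ≥ r ∨ l ≥ c then st
            else if pvAtA s k l > st.1 then (pvAtA s k l, k, l) else st) st) st0 = st0 := by
      intro st0
      calc (PySem.List.pyRange (min r (i + W)) (i + W) 1).foldl (fun st k =>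
            (PySem.List.pyRange j (j + W) 1).foldl (fun (st : Int × Int × Int) l =>
              if k ≥ r ∨ l ≥ c then st
              else if pvAtA s k l > st.1 then (pvAtA s k l, k, l) else st) st) st0
          = (PySem.List.pyRange (min r (i + W)) (i + W) 1).foldl (fun acc _ => acc) st0 := by
            apply PySem.List.foldl_congr_mem
            intro acc k hkmem
            obtain ⟨hk1, hk2⟩ := PySem.List.mem_pyRange_one.mp hkmem
            have hkr : k ≥ r := by omega
            calc (PySem.List.pyRange j (j + W) 1).foldl (fun (st : Int × Int × Int) l =>
                  if k ≥ r ∨ l ≥ c then st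
                  else if pvAtA s k l > st.1 then (pvAtA s k l, k, l) else st) acc
                = (PySem.List.pyRange j (j + W) 1).foldl (fun acc _ => acc) acc := by
                  apply PySem.List.foldl_congr_mem
                  intro acc' l _
                  rw [if_pos (Or.inl hkr)]
              _ = acc := PySem.List.foldl_ignore _ _
        _ = st0 := PySem.List.foldl_ignore _ _
    rw [htail]
    apply PySem.List.foldl_congr_mem
    intro acc k hkmem
    obtain ⟨hk1, hk2⟩ := PySem.List.mem_pyRange_one.mp hkmem
    calc (PySem.List.pyRange j (j + W) 1).foldl (fun (st : Int × Int × Int) l =>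
          if k ≥ r ∨ l ≥ c then st
          else if pvAtA s k l > st.1 then (pvAtA s k l, k, l) else st) acc
        = (PySem.List.pyRange j (j + W) 1).foldl (fun (st : Int × Int × Int) l =>
            if l < c then (if pvAtA s k l > st.1 then (pvAtA s k l, k, l) else st) else st) acc := by
          apply PySem.List.foldl_congr_mem
          intro acc' l _
          by_cases hlc : l < c
          · rw [if_neg (by omega : ¬ (k ≥ r ∨ l ≥ c)), if_pos hlc]
          · rw [if_pos (Or.inr (by omega)), if_neg hlc]
      _ = (PySem.List.pyRange j (min c (j + W)) 1).foldl (fun (st : Int × Int × Int) l =>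
            if pvAtA s k l > st.1 then (pvAtA s k l, k, l) else st) acc := by
          rw [PySem.List.foldl_ite_eq_foldl_filter (p := fun l : Int => l < c)]
          congr 1
          rw [List.filter_congr (p := fun l : Int => decide (l < c))
                (q := fun l : Int => decide (j ≤ l ∧ l < c))
                (fun l hl => by
                  simp only [decide_eq_decide]
                  exact ⟨fun h => ⟨(PySem.List.mem_pyRange_one.mp hl).1, h⟩, fun h => h.2⟩),
              pvFilterInterval j (j + W) j c, max_self, min_comm]
  rw [hA]
  simp only [pvFoldFlat]
  rw [pvDictScan, PySem.Dict.getD_empty, hcells]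

-- spectrogram[0] is the head of a nonempty list (and [] for the empty one)
theorem pvRow0 (s : List (List Int)) : (PySem.List.pyGet? s 0).getD [] = s.headD [] := by
  cases s with
  | nil => rfl
  | cons a t => simp

-- on a spectrogram whose rows all have at least c entries, B's enumerate-based pass
-- is the index-based pass over the full 0..r-1 x 0..c-1 grid
theorem pvScanEnum (s : List (List Int)) (W c : Int) (h0c : 0 ≤ c)
    (hrect : ∀ row ∈ s, c ≤ (row.length : Int)) :
    (PySem.List.enumerate s).foldl (fun best kr =>
        (PySem.List.enumerate (PySem.List.slice kr.2 none (some c))).foldl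
          (fun (best : PySem.Dict (Int × Int) (Int × Int × Int)) lv =>
            if lv.2 > (best.getD (PySem.Int.floordiv kr.1 W, PySem.Int.floordiv lv.1 W) (-1, -1, -1)).1
            then best.insert (PySem.Int.floordiv kr.1 W, PySem.Int.floordiv lv.1 W) (lv.2, kr.1, lv.1)
            else best) best) PySem.Dict.empty
      = (PySem.List.pyRange 0 (s.length : Int) 1).foldl (fun best k =>
          (PySem.List.pyRange 0 c 1).foldl
            (fun (best : PySem.Dict (Int × Int) (Int × Int × Int)) l =>
              if pvAtA s k l > (best.getD (PySem.Int.floordiv k W, PySem.Int.floordiv l W) (-1, -1, -1)).1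
              then best.insert (PySem.Int.floordiv k W, PySem.Int.floordiv l W) (pvAtA s k l, k, l)
              else best) best) PySem.Dict.empty := by
  rw [PySem.List.enumerate_eq_map_pyRange s [], PySem.List.len_eq, List.foldl_map]
  apply PySem.List.foldl_congr_mem
  intro d k hk
  dsimp only
  obtain ⟨hk0, hkr⟩ := PySem.List.mem_pyRange_one.mp hk
  have hkN : k.toNat < s.length := by omega
  have hrow : PySem.List.pyGetD s k [] = s[k.toNat] :=
    PySem.List.pyGetD_eq_getElem s [] hk0 hkr
  have hc : c ≤ (s[k.toNat].length : Int) := hrect _ (List.getElem_mem hkN)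
  rw [hrow, PySem.List.slice_to _ h0c]
  rw [PySem.List.enumerate_eq_map_pyRange (List.take c.toNat s[k.toNat]) 0, PySem.List.len_eq]
  have hlen : (((List.take c.toNat s[k.toNat]).length : Nat) : Int) = c := by
    simp only [List.length_take]
    omega
  rw [hlen, List.foldl_map]
  apply PySem.List.foldl_congr_mem
  intro d' l hl
  dsimp only
  obtain ⟨hl0, hlc⟩ := PySem.List.mem_pyRange_one.mp hl
  have hval : PySem.List.pyGetD (List.take c.toNat s[k.toNat]) l 0 = pvAtA s k l := by
    have htl : l < (((List.take c.toNat s[k.toNat]).length : Nat) : Int) := by rw [hlen]; exact hlc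
    rw [PySem.List.pyGetD_eq_getElem _ 0 hl0 htl, List.getElem_take]
    have hA : pvAtA s k l = PySem.List.pyGetD (PySem.List.pyGetD s k []) l 0 := rfl
    rw [hA, hrow, PySem.List.pyGetD_eq_getElem _ 0 hl0 (by omega : l < (s[k.toNat].length : Int))]
  rw [hval]

-- the two output loops agree element by element
theorem pvOutCongr (g h : Int → Int → List Int) (I J : List Int)
    (hgh : ∀ i ∈ I, ∀ j ∈ J, g i j = h i j) :
    I.foldl (fun acc i => J.foldl (fun acc j => acc ++ [g i j]) acc) ([] : List (List Int))
      = I.foldl (fun acc i => J.foldl (fun acc j => acc ++ [h i j]) acc) [] := by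
  apply PySem.List.foldl_congr_mem
  intro acc i hiI
  apply PySem.List.foldl_congr_mem
  intro acc j hjJ
  rw [hgh i hiI j hjJ]

-- assembling the windows: the two outputs agree once every window state agrees
theorem pvAssemble (s : List (List Int)) (W r c : Int)
    (wA wB : Int → Int → Int × Int × Int)
    (hw : ∀ i ∈ PySem.List.pyRange 0 r W, ∀ j ∈ PySem.List.pyRange 0 c W, wA i j = wB i j) :
    (PySem.List.pyRange 0 r W).foldl (fun acc i =>
        (PySem.List.pyRange 0 c W).foldl (fun acc j =>
          acc ++ [[(wA i j).2.1, (wA i j).2.2, pvAtA s (wA i j).2.1 (wA i j).2.2]]) acc)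
      ([] : List (List Int))
    = (PySem.List.pyRange 0 r W).foldl (fun acc i =>
        (PySem.List.pyRange 0 c W).foldl (fun acc j =>
          acc ++ [[(wB i j).2.1, (wB i j).2.2, pvAtA s (wB i j).2.1 (wB i j).2.2]]) acc) [] := by
  apply pvOutCongr
  intro i hiI j hjJ
  rw [hw i hiI j hjJ]

-- ===== VERDICT (by name: the statement is the Claim_ definition above) =====
theorem compute_constellations_spec : Claim_equal_compute_constellations := by
  intro s W _ hpre
  obtain ⟨hne, hW0, hpre3⟩ := hpre
  unfold Spec_compute_constellations
  rcases lt_trichotomy W 0 with hlt | heq | hgt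
  · have h0 : PySem.List.pyRange 0 (s.length : Int) W = [] :=
      pvRange_neg_nil _ _ (Int.natCast_nonneg _) hlt
    simp [compute_constellations, compute_constellations_alt, h0]
  · exact absurd heq hW0
  · have hrect : ∀ row ∈ s, ((((PySem.List.pyGet? s 0).getD []).length : Nat) : Int) ≤ (row.length : Int) := by
      intro row hrow
      rw [pvRow0 s]
      exact_mod_cast hpre3 hgt row hrow
    have hD := pvScanEnum s W (((PySem.List.pyGet? s 0).getD []).length : Int)
      (Int.natCast_nonneg _) hrect
    refine pvAssemble s W (s.length : Int) (((PySem.List.pyGet? s 0).getD []).length : Int)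
      (fun i j =>
        (PySem.List.pyRange i (i + W) 1).foldl (fun st k =>
          (PySem.List.pyRange j (j + W) 1).foldl (fun (st : Int × Int × Int) l =>
            if k ≥ (s.length : Int) ∨ l ≥ (((PySem.List.pyGet? s 0).getD []).length : Int) then st
            else if pvAtA s k l > st.1 then (pvAtA s k l, k, l) else st) st)
          ((-1 : Int), (-1 : Int), (-1 : Int)))
      (fun i j =>
        ((PySem.List.enumerate s).foldl (fun best kr =>
            (PySem.List.enumerate (PySem.List.slice kr.2 none
                (some (((PySem.List.pyGet? s 0).getD []).length : Int)))).foldl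
              (fun (best : PySem.Dict (Int × Int) (Int × Int × Int)) lv =>
                if lv.2 > (best.getD (PySem.Int.floordiv kr.1 W, PySem.Int.floordiv lv.1 W) (-1, -1, -1)).1
                then best.insert (PySem.Int.floordiv kr.1 W, PySem.Int.floordiv lv.1 W) (lv.2, kr.1, lv.1)
                else best) best) PySem.Dict.empty).getD
          (PySem.Int.floordiv i W, PySem.Int.floordiv j W) (-1, -1, -1)) ?_
    intro i hi j hj
    dsimp only
    rw [hD]
    exact pvWindow s W i j _ _ hgt hi hj
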